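-- pv_equiv track=rewrite | github.com/pjrigali/Poker-Now-Analysis | Poker OOP.py | moves_in_hand
-- ===== SOURCE A (Python) =====
-- def moves_in_hand(lst):
--
--     if len(lst) == 0:
--         return [(),(),(),()]
--     else:
--         checks, raises, calls, folds = (), (), (), ()
--         for j in lst[0]:
--             if "folds" in j:
--                 folds = folds + tuple((j.split('@')[0].replace('"','').strip(),))
--             if "calls" in j:
--                 calls = calls + (j.split('@')[0].replace('"','').strip(), j.split('calls ')[1])
--             if "raises" in j:
--                 raises = raises + (j.split('@')[0].replace('"','').strip(), j.split('raises to')[1])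
--             if "checks" in j:
--                 checks = checks + tuple((j.split('@')[0].replace('"','').strip(),))
--         return [tuple(checks), tuple(raises), tuple(calls), tuple(folds)]
-- ===== SOURCE B (Python) =====
-- def moves_in_hand(lst):
--     if len(lst) == 0:
--         return [(), (), (), ()]
--     # Phase 1: flatten the hand into a tagged token stream.
--     # Tags: 0=checks, 1=raises, 2=calls, 3=folds.  A move may emit tokens for
--     # several tags (the keyword tests are independent); per move it emits the
--     # cleaned name, plus the parsed amount for calls/raises.
--     events = []
--     for j in lst[0]:
--         name = j.split('@')[0].replace('"', '').strip()
--         if 'checks' in j: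
--             events.append((0, name))
--         if 'raises' in j:
--             events.append((1, name))
--             events.append((1, j.split('raises to')[1]))
--         if 'calls' in j:
--             events.append((2, name))
--             events.append((2, j.split('calls ')[1]))
--         if 'folds' in j:
--             events.append((3, name))
--     # Phase 2: one grouping pass over the stream into the four buckets.
--     buckets = [[], [], [], []]
--     for tag, tok in events:
--         buckets[tag].append(tok)
--     return [tuple(b) for b in buckets]
-- ===== Notes on version B (the rewrite author's own statement) =====
-- stated objective: alternative
-- what changed: Replaces A's single loop threading four growing tuple accumulators by a two-phase pipeline: first flatten the hand into one tagged (kind, token) event stream, then a separate grouping pass partitions the stream into the four buckets.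
import Mathlib
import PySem

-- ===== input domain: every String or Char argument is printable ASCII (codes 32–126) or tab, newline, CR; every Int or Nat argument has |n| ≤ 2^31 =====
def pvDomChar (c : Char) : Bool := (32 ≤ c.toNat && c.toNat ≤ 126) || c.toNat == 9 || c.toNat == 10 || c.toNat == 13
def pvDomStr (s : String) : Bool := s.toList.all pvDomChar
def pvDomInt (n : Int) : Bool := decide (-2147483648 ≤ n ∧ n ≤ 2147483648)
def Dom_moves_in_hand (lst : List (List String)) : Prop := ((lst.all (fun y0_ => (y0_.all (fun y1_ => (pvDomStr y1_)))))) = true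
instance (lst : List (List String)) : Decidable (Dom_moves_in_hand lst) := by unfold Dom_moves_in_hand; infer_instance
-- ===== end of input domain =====

-- B replaces A's single loop over four tuple accumulators by a two-phase pipeline: flatten the hand
-- into one tagged (kind, token) event stream, then one grouping pass partitions it into the four buckets
-- (objective: alternative).

-- shared primitive expressions (both Pythons contain these literal sub-expressions)
-- j.split('@')[0].replace('"','').strip()
def pvName (j : String) : String :=
  PySem.Str.strip (PySem.Str.replace ((((PySem.Str.split? j "@").getD [])[0]?).getD "") "\"" "")
-- j.split(sep)[1]  (default "" is only reached outside Pre_, where Python raises IndexError)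
def pvSplit1 (j sep : String) : String :=
  (((PySem.Str.split? j sep).getD [])[1]?).getD ""

-- ===== PORT A =====
def moves_in_hand (lst : List (List String)) : List (List String) :=
  match lst with
  | [] => [[], [], [], []]
  | moves :: _ =>
    let r := moves.foldl
      (fun (acc : List String × List String × List String × List String) j =>
        let (checks, raises, calls, folds) := acc
        let folds := if PySem.Str.isIn "folds" j then folds ++ [pvName j] else folds
        let calls := if PySem.Str.isIn "calls" j then calls ++ [pvName j, pvSplit1 j "calls "] else calls
        let raises := if PySem.Str.isIn "raises" j then raises ++ [pvName j, pvSplit1 j "raises to"] else raises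
        let checks := if PySem.Str.isIn "checks" j then checks ++ [pvName j] else checks
        (checks, raises, calls, folds))
      ([], [], [], [])
    [r.1, r.2.1, r.2.2.1, r.2.2.2]

-- ===== PORT B =====
-- Phase 1 of Source B: each move's tagged tokens (0=checks, 1=raises, 2=calls, 3=folds)
def pvEvts (j : String) : List (Nat × String) :=
  (if PySem.Str.isIn "checks" j then [(0, pvName j)] else []) ++
  (if PySem.Str.isIn "raises" j then [(1, pvName j), (1, pvSplit1 j "raises to")] else []) ++
  (if PySem.Str.isIn "calls" j then [(2, pvName j), (2, pvSplit1 j "calls ")] else []) ++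
  (if PySem.Str.isIn "folds" j then [(3, pvName j)] else [])

def moves_in_hand_alt (lst : List (List String)) : List (List String) :=
  match lst with
  | [] => [[], [], [], []]
  | moves :: _ =>
    let events := moves.flatMap pvEvts
    -- Phase 2 of Source B: buckets[tag].append(tok)
    let b := events.foldl
      (fun (b : List String × List String × List String × List String) e =>
        match e.1 with
        | 0 => (b.1 ++ [e.2], b.2.1, b.2.2.1, b.2.2.2)
        | 1 => (b.1, b.2.1 ++ [e.2], b.2.2.1, b.2.2.2)
        | 2 => (b.1, b.2.1, b.2.2.1 ++ [e.2], b.2.2.2)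
        | _ => (b.1, b.2.1, b.2.2.1, b.2.2.2 ++ [e.2]))
      ([], [], [], [])
    [b.1, b.2.1, b.2.2.1, b.2.2.2]

-- ===== PRECONDITION & SPEC =====
-- Pre_ excludes exactly the inputs where Python A raises IndexError (B raises there too): a move in
-- lst[0] containing "calls" without any occurrence of "calls ", or "raises" without "raises to".
def Pre_moves_in_hand (lst : List (List String)) : Prop :=
  ∀ j ∈ lst.headD [],
      (PySem.Str.isIn "calls" j = true → 2 ≤ ((PySem.Str.split? j "calls ").getD []).length) ∧
      (PySem.Str.isIn "raises" j = true → 2 ≤ ((PySem.Str.split? j "raises to").getD []).length)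
instance (lst : List (List String)) : Decidable (Pre_moves_in_hand lst) := by
  unfold Pre_moves_in_hand; infer_instance

def pvWitness_moves_in_hand : List (List String) :=
  [["\"Bob @ x\" checks", "\"Al @ y\" calls 50", "\"C @ z\" raises to 100", "\"D @ w\" folds"]]

def Spec_moves_in_hand (lst : List (List String)) (out : List (List String)) : Prop := out = moves_in_hand_alt lst
instance (lst : List (List String)) (out : List (List String)) : Decidable (Spec_moves_in_hand lst out) := by unfold Spec_moves_in_hand; infer_instance

-- ===== CLAIM (what is proved, stated in full; the proofs are below) =====
def Claim_equal_moves_in_hand : Prop := ∀ (lst : List (List String)), Dom_moves_in_hand lst → Pre_moves_in_hand lst → Spec_moves_in_hand lst (moves_in_hand lst)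

-- ===== LEMMAS AND PROOFS =====

-- the tokens of a given tag in an event stream, in stream order
def pvPick (k : Nat) (es : List (Nat × String)) : List String :=
  (es.filter (fun e => e.1 == k)).map (fun e => e.2)

theorem pvPick_append (k : Nat) (xs ys : List (Nat × String)) :
    pvPick k (xs ++ ys) = pvPick k xs ++ pvPick k ys := by
  simp [pvPick]

-- B's grouping pass collects, per tag, exactly the tokens of that tag in stream order.
theorem pv_group_eq (es : List (Nat × String)) (hes : ∀ e ∈ es, e.1 < 4) (c r ca f : List String) :
    es.foldl
      (fun (b : List String × List String × List String × List String) e =>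
        match e.1 with
        | 0 => (b.1 ++ [e.2], b.2.1, b.2.2.1, b.2.2.2)
        | 1 => (b.1, b.2.1 ++ [e.2], b.2.2.1, b.2.2.2)
        | 2 => (b.1, b.2.1, b.2.2.1 ++ [e.2], b.2.2.2)
        | _ => (b.1, b.2.1, b.2.2.1, b.2.2.2 ++ [e.2]))
      (c, r, ca, f)
    = (c ++ pvPick 0 es, r ++ pvPick 1 es, ca ++ pvPick 2 es, f ++ pvPick 3 es) := by
  induction es generalizing c r ca f with
  | nil => simp [pvPick]
  | cons e t ih =>
    obtain ⟨k, v⟩ := e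
    have ht : ∀ e ∈ t, e.1 < 4 := fun e he => hes e (List.mem_cons_of_mem _ he)
    have hk : k < 4 := hes (k, v) (List.mem_cons_self ..)
    interval_cases k <;>
      simp [List.foldl_cons, ih ht, pvPick, List.append_assoc]

-- every tag phase 1 produces is one of 0,1,2,3
theorem pvEvts_tag_lt (j : String) : ∀ e ∈ pvEvts j, e.1 < 4 := by
  unfold pvEvts
  split_ifs <;> simp_all

-- pvPick of a single move's tokens, per tag
theorem pvPick_evts0 (j : String) :
    pvPick 0 (pvEvts j) = if PySem.Str.isIn "checks" j then [pvName j] else [] := by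
  unfold pvEvts; split_ifs <;> simp [pvPick]
theorem pvPick_evts1 (j : String) :
    pvPick 1 (pvEvts j) = if PySem.Str.isIn "raises" j then [pvName j, pvSplit1 j "raises to"] else [] := by
  unfold pvEvts; split_ifs <;> simp [pvPick]
theorem pvPick_evts2 (j : String) :
    pvPick 2 (pvEvts j) = if PySem.Str.isIn "calls" j then [pvName j, pvSplit1 j "calls "] else [] := by
  unfold pvEvts; split_ifs <;> simp [pvPick]
theorem pvPick_evts3 (j : String) :
    pvPick 3 (pvEvts j) = if PySem.Str.isIn "folds" j then [pvName j] else [] := by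
  unfold pvEvts; split_ifs <;> simp [pvPick]

-- A's combined fold also computes, per category, the tokens of that tag of the flattened stream.
theorem pv_afold_eq (moves : List String) (c r ca f : List String) :
    moves.foldl
      (fun (acc : List String × List String × List String × List String) j =>
        let (checks, raises, calls, folds) := acc
        let folds := if PySem.Str.isIn "folds" j then folds ++ [pvName j] else folds
        let calls := if PySem.Str.isIn "calls" j then calls ++ [pvName j, pvSplit1 j "calls "] else calls
        let raises := if PySem.Str.isIn "raises" j then raises ++ [pvName j, pvSplit1 j "raises to"] else raises
        let checks := if PySem.Str.isIn "checks" j then checks ++ [pvName j] else checks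
        (checks, raises, calls, folds))
      (c, r, ca, f)
    = (c ++ pvPick 0 (moves.flatMap pvEvts), r ++ pvPick 1 (moves.flatMap pvEvts),
       ca ++ pvPick 2 (moves.flatMap pvEvts), f ++ pvPick 3 (moves.flatMap pvEvts)) := by
  induction moves generalizing c r ca f with
  | nil => simp [pvPick]
  | cons j t ih =>
    simp only [List.foldl_cons, List.flatMap_cons, pvPick_append,
      pvPick_evts0, pvPick_evts1, pvPick_evts2, pvPick_evts3]
    rw [ih]
    split_ifs <;> simp [List.append_assoc]

-- ===== VERDICT (by name: the statement is the Claim_ definition above) =====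
theorem moves_in_hand_spec : Claim_equal_moves_in_hand := by
  intro lst _ _
  unfold Spec_moves_in_hand moves_in_hand moves_in_hand_alt
  cases lst with
  | nil => rfl
  | cons moves rest =>
    have h : ∀ e ∈ moves.flatMap pvEvts, e.1 < 4 := by
      intro e he
      obtain ⟨j, _, hj⟩ := List.mem_flatMap.mp he
      exact pvEvts_tag_lt j e hj
    simp only [pv_afold_eq, pv_group_eq _ h, List.nil_append]
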